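-- pv_equiv track=rewrite | github.com/yasser348/MET-2024-2025-Algorithms- | Task2/سلمى خالد محمود عبد المعطى رمضان.py | schedule_exams
-- ===== SOURCE A (Python) =====
-- def schedule_exams(courses, students):
--
--     conflicts = {course: set() for course in courses}
--
--     for course1 in courses:
--         for course2 in courses:
--             if course1 != course2:
--
--                 if set(students[course1]) & set(students[course2]):
--                     conflicts[course1].add(course2)
--
--
--     sorted_courses = sorted(conflicts.keys(), key=lambda x: len(conflicts[x]), reverse=True)
--
--
--     time_slots = {}
--     for course in sorted_courses:
--
--         used_slots = {time_slots[neighbor] for neighbor in conflicts[course] if neighbor in time_slots}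
--
--         for slot in range(len(courses)):
--             if slot not in used_slots:
--                 time_slots[course] = slot
--                 break
--
--     return time_slots
-- ===== SOURCE B (Python) =====
-- def schedule_exams(courses, students):
--     # Invert student -> courses instead of testing every course pair for overlap.
--     uniq = list(dict.fromkeys(courses))
--     by_student = {}
--     for c in uniq:
--         for s in students.get(c, []):
--             by_student.setdefault(s, set()).add(c)
--     groups = {}
--     for group in by_student.values():
--         for c in group:
--             groups.setdefault(c, set()).update(group)
--     adj = {c: groups.get(c, set()) - {c} for c in uniq}
--     slots = {}
--     for c in sorted(uniq, key=lambda c: len(adj[c]), reverse=True):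
--         used = {slots[n] for n in adj[c] if n in slots}
--         slots[c] = next(t for t in range(len(used) + 1) if t not in used)
--     return slots
-- ===== Notes on version B (the rewrite author's own statement) =====
-- stated objective: faster
-- what changed: Instead of testing every ordered course pair for student overlap with freshly built sets (O(C^2*S)), B inverts the mapping to student->courses once and unions each student's course group into the adjacency sets, then runs the same stable degree-descending greedy coloring with the minimal free slot searched only up to the number of used slots.
import Mathlib
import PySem

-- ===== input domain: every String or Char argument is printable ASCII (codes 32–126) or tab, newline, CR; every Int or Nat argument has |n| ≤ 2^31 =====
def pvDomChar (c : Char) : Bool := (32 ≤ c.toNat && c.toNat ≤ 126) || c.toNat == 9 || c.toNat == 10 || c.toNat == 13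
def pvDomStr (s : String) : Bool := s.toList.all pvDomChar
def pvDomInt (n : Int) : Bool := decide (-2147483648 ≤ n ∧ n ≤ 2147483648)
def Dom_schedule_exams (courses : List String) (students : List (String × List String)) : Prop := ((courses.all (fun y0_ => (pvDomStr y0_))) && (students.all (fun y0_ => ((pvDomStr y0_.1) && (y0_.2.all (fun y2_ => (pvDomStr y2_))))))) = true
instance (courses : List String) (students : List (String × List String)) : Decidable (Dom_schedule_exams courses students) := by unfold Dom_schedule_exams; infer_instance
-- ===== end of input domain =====

-- B replaces A's quadratic all-pairs student-set intersection test by one inversion of the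
-- student→courses mapping (conflict groups per student), keeping the same stable
-- degree-descending greedy slot assignment; objective: faster.

-- port helper for A: Python's dict subscript students[c]; [] only where Python's A raises
-- (those inputs are outside Pre_) or where A never evaluates the subscript
def pvLookup (students : List (String × List String)) (c : String) : List String :=
  match students.find? (fun p => p.1 == c) with
  | some p => p.2
  | none => []

-- shared port helper: the identical set comprehension {ts[n] for n in X if n in ts} of both Pythons
def pvUsed (conf : PySem.Dict String (PySem.Set String)) (ts : PySem.Dict String Int) (c : String) : PySem.Set Int :=
  (conf.getD c PySem.Set.empty).foldl
    (fun u n => if ts.contains n then PySem.Set.add u (ts.getD n 0) else u) PySem.Set.empty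

-- ===== PORT A =====
-- conflicts = {course: set()}; nested loop over all ordered pairs adding course2 on nonempty intersection
def pvConflicts (courses : List String) (students : List (String × List String)) :
    PySem.Dict String (PySem.Set String) :=
  courses.foldl (fun d c1 =>
    courses.foldl (fun d c2 =>
      if c1 ≠ c2 then
        if PySem.Set.inter (PySem.Set.ofList (pvLookup students c1)) (PySem.Set.ofList (pvLookup students c2)) ≠ [] then
          d.modify c1 PySem.Set.empty (fun s => PySem.Set.add s c2)
        else d
      else d) d)
    (courses.foldl (fun d c => d.insert c PySem.Set.empty) PySem.Dict.empty)

def schedule_exams (courses : List String) (students : List (String × List String)) : List (String × Int) :=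
  let conflicts := pvConflicts courses students
  let sortedCourses := PySem.List.sorted conflicts.keys
    (fun x => PySem.Set.len (conflicts.getD x PySem.Set.empty)) true
  let timeSlots : PySem.Dict String Int :=
    sortedCourses.foldl (fun ts c =>
      let used := pvUsed conflicts ts c
      match (PySem.List.pyRange 0 (courses.length : Int)).find?
          (fun slot => !(PySem.Set.contains used slot)) with
      | some slot => ts.insert c slot
      | none => ts) PySem.Dict.empty
  timeSlots.items

-- ===== PORT B =====
-- invert: student -> set of courses that student takes (over the deduplicated course list);
-- B's Python uses students.get(c, []), which pvLookup is exactly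
def pvByStudent (uniq : List String) (students : List (String × List String)) :
    PySem.Dict String (PySem.Set String) :=
  uniq.foldl (fun d c =>
    (pvLookup students c).foldl (fun d s => d.modify s PySem.Set.empty (fun g => PySem.Set.add g c)) d)
    PySem.Dict.empty

-- union each student's course group into the group of every course in it
def pvGroups (bs : PySem.Dict String (PySem.Set String)) : PySem.Dict String (PySem.Set String) :=
  bs.values.foldl (fun d g =>
    g.foldl (fun d c => d.modify c PySem.Set.empty (fun s => PySem.Set.update s g)) d)
    PySem.Dict.empty

-- adj = {c: groups.get(c, set()) - {c} for c in uniq}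
def pvAdj (courses : List String) (students : List (String × List String)) :
    PySem.Dict String (PySem.Set String) :=
  let uniq := PySem.List.dedup courses
  let groups := pvGroups (pvByStudent uniq students)
  uniq.foldl (fun d c => d.insert c (PySem.Set.diff (groups.getD c PySem.Set.empty) [c])) PySem.Dict.empty

def schedule_exams_alt (courses : List String) (students : List (String × List String)) : List (String × Int) :=
  let uniq := PySem.List.dedup courses
  let adj := pvAdj courses students
  let slots : PySem.Dict String Int :=
    (PySem.List.sorted uniq (fun c => PySem.Set.len (adj.getD c PySem.Set.empty)) true).foldl
      (fun ts c =>
        let used := pvUsed adj ts c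
        match (PySem.List.pyRange 0 (PySem.Set.len used + 1)).find?
            (fun t => !(PySem.Set.contains used t)) with
        | some t => ts.insert c t
        | none => ts) PySem.Dict.empty
  slots.items

-- ===== PRECONDITION & SPEC =====
-- Pre_ is exactly the set of inputs on which A returns: A raises KeyError precisely when there
-- exist two distinct courses (so the pair loop performs a lookup) and some course is missing
-- from the students dict; no input on which A returns a value is excluded.
def Pre_schedule_exams (courses : List String) (students : List (String × List String)) : Prop :=
  (∀ c1 ∈ courses, ∀ c2 ∈ courses, c1 = c2) ∨ (∀ c ∈ courses, c ∈ students.map Prod.fst)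
instance (courses : List String) (students : List (String × List String)) : Decidable (Pre_schedule_exams courses students) := by unfold Pre_schedule_exams; infer_instance

def pvWitness_schedule_exams : List String × (List (String × List String)) :=
  (["a", "b"], [("a", ["s"]), ("b", ["s"])])

def Spec_schedule_exams (courses : List String) (students : List (String × List String)) (out : List (String × Int)) : Prop := out = schedule_exams_alt courses students
instance (courses : List String) (students : List (String × List String)) (out : List (String × Int)) : Decidable (Spec_schedule_exams courses students out) := by unfold Spec_schedule_exams; infer_instance

-- ===== CLAIM (what is proved, stated in full; the proofs are below) =====
def Claim_equal_schedule_exams : Prop := ∀ (courses : List String) (students : List (String × List String)), Dom_schedule_exams courses students → Pre_schedule_exams courses students → Spec_schedule_exams courses students (schedule_exams courses students)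

-- ===== LEMMAS AND PROOFS =====

-- c1 and c2 are distinct courses sharing at least one student (A's test, verbatim)
def pvP (students : List (String × List String)) (c1 c2 : String) : Bool :=
  decide (c1 ≠ c2 ∧ PySem.Set.inter (PySem.Set.ofList (pvLookup students c1)) (PySem.Set.ofList (pvLookup students c2)) ≠ [])

lemma pvP_iff (students : List (String × List String)) (c1 c2 : String) :
    pvP students c1 c2 = true
    ↔ (c1 ≠ c2 ∧ PySem.Set.inter (PySem.Set.ofList (pvLookup students c1)) (PySem.Set.ofList (pvLookup students c2)) ≠ []) := by
  simp [pvP]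

def pvShares (students : List (String × List String)) (c1 c2 : String) : Prop :=
  ∃ s, s ∈ pvLookup students c1 ∧ s ∈ pvLookup students c2

lemma pv_not_mem_empty {α : Type} (y : α) : y ∈ (PySem.Set.empty : PySem.Set α) ↔ False := by
  simp [PySem.Set.empty]

lemma pv_foldl_inv_mem {β γ : Type} (F : γ → β → γ) (P : γ → Prop) :
    ∀ (l : List β), (∀ d b, b ∈ l → P d → P (F d b)) → ∀ d, P d → P (l.foldl F d)
  | [], _, _, h => h
  | x :: t, hF, d, h => by
      rw [List.foldl_cons]
      exact pv_foldl_inv_mem F P t (fun d b hb => hF d b (List.mem_cons_of_mem _ hb)) _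
        (hF d x (by simp) h)

lemma pv_inter_ne_iff (l1 l2 : List String) :
    (PySem.Set.inter (PySem.Set.ofList l1) (PySem.Set.ofList l2) ≠ []) ↔ ∃ s, s ∈ l1 ∧ s ∈ l2 := by
  constructor
  · intro h
    obtain ⟨x, hx⟩ := List.exists_mem_of_ne_nil _ h
    rw [PySem.Set.mem_inter] at hx
    exact ⟨x, (PySem.Set.mem_ofList _ _).1 hx.1, (PySem.Set.mem_ofList _ _).1 hx.2⟩
  · rintro ⟨s, h1, h2⟩ hnil
    have hs : s ∈ PySem.Set.inter (PySem.Set.ofList l1) (PySem.Set.ofList l2) := by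
      rw [PySem.Set.mem_inter]
      exact ⟨(PySem.Set.mem_ofList _ _).2 h1, (PySem.Set.mem_ofList _ _).2 h2⟩
    rw [hnil] at hs
    simp at hs

lemma pv_innerA_eq (students : List (String × List String)) (c1 : String)
    (courses : List String) (d : PySem.Dict String (PySem.Set String)) :
    courses.foldl (fun d c2 =>
      if c1 ≠ c2 then
        if PySem.Set.inter (PySem.Set.ofList (pvLookup students c1)) (PySem.Set.ofList (pvLookup students c2)) ≠ [] then
          d.modify c1 PySem.Set.empty (fun s => PySem.Set.add s c2)
        else d
      else d) d
    = (courses.filter (pvP students c1)).foldl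
        (fun d c2 => d.modify c1 PySem.Set.empty (fun s => PySem.Set.add s c2)) d := by
  rw [← PySem.List.foldl_if_eq_foldl_filter (pvP students c1)
    (fun d c2 => d.modify c1 PySem.Set.empty (fun s => PySem.Set.add s c2)) courses d]
  refine PySem.List.foldl_congr_mem _ _ _ _ ?_
  intro acc x _
  by_cases h1 : c1 = x
  · simp [pvP, h1]
  · by_cases h2 : PySem.Set.inter (PySem.Set.ofList (pvLookup students c1)) (PySem.Set.ofList (pvLookup students x)) ≠ [] <;>
      simp [pvP, h1, h2]

lemma pv_getD_modify_add (k : String) (l : List String)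
    (d : PySem.Dict String (PySem.Set String)) (c : String) :
    ((l.foldl (fun d x => d.modify k PySem.Set.empty (fun s => PySem.Set.add s x)) d).getD c PySem.Set.empty)
    = if c = k then PySem.Set.update (d.getD k PySem.Set.empty) l else d.getD c PySem.Set.empty := by
  induction l generalizing d with
  | nil =>
    rw [List.foldl_nil]
    split
    · next h => rw [h, PySem.Set.update_nil]
    · rfl
  | cons x t ih =>
    rw [List.foldl_cons, ih]
    by_cases hc : c = k
    · subst hc
      simp [PySem.Set.update_cons]
    · simp [PySem.Dict.getD_modify, hc]

lemma pv_conf0_getD (l : List String) (d : PySem.Dict String (PySem.Set String)) (c : String)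
    (h : d.getD c PySem.Set.empty = PySem.Set.empty) :
    ((l.foldl (fun d c => d.insert c PySem.Set.empty) d).getD c PySem.Set.empty) = PySem.Set.empty := by
  induction l generalizing d with
  | nil => simpa using h
  | cons x t ih =>
    rw [List.foldl_cons]
    refine ih _ ?_
    rw [PySem.Dict.getD_insert]
    split
    · rfl
    · exact h

lemma pv_memA_fold (courses : List String) (students : List (String × List String))
    (l : List String) (d : PySem.Dict String (PySem.Set String)) (c y : String) :
    (y ∈ ((l.foldl (fun d c1 =>
      courses.foldl (fun d c2 =>
        if c1 ≠ c2 then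
          if PySem.Set.inter (PySem.Set.ofList (pvLookup students c1)) (PySem.Set.ofList (pvLookup students c2)) ≠ [] then
            d.modify c1 PySem.Set.empty (fun s => PySem.Set.add s c2)
          else d
        else d) d) d).getD c PySem.Set.empty))
    ↔ (y ∈ d.getD c PySem.Set.empty ∨ (c ∈ l ∧ pvP students c y = true ∧ y ∈ courses)) := by
  induction l generalizing d with
  | nil => simp
  | cons c1 t ih =>
    rw [List.foldl_cons, ih, pv_innerA_eq, pv_getD_modify_add]
    by_cases hc : c = c1
    · subst hc
      rw [if_pos rfl]
      simp only [PySem.Set.mem_update, List.mem_filter, List.mem_cons, true_or, true_and]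
      tauto
    · simp only [if_neg hc, List.mem_cons]
      tauto

lemma pv_memA (courses : List String) (students : List (String × List String)) (c y : String) :
    y ∈ ((pvConflicts courses students).getD c PySem.Set.empty)
    ↔ (c ∈ courses ∧ y ∈ courses ∧ c ≠ y ∧ pvShares students c y) := by
  unfold pvConflicts
  rw [pv_memA_fold]
  rw [pv_conf0_getD courses _ c (by simp [PySem.Dict.getD_empty])]
  have hP : (pvP students c y = true) ↔ (c ≠ y ∧ pvShares students c y) := by
    unfold pvShares
    rw [pvP_iff, pv_inter_ne_iff]
  simp only [PySem.Set.empty, List.not_mem_nil, false_or]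
  rw [hP]
  tauto

lemma pv_confA_getD_nodup (courses : List String) (students : List (String × List String)) (c : String) :
    ((pvConflicts courses students).getD c PySem.Set.empty).Nodup := by
  unfold pvConflicts
  refine pv_foldl_inv_mem _ (fun d : PySem.Dict String (PySem.Set String) => ∀ c, (d.getD c PySem.Set.empty).Nodup) courses ?_ _ ?_ c
  · intro d c1 _ hd
    rw [pv_innerA_eq]
    refine pv_foldl_inv_mem _ (fun d : PySem.Dict String (PySem.Set String) => ∀ c, (d.getD c PySem.Set.empty).Nodup) _ ?_ d hd
    intro d x _ hd c
    rw [PySem.Dict.getD_modify]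
    split
    · apply PySem.Set.nodup_add
      exact hd _
    · exact hd c
  · intro c
    rw [pv_conf0_getD courses _ c (by simp [PySem.Dict.getD_empty])]
    exact List.nodup_nil

lemma pv_keysA (courses : List String) (students : List (String × List String)) :
    (pvConflicts courses students).keys = PySem.Set.ofList courses := by
  unfold pvConflicts
  have h0 : (courses.foldl (fun (d : PySem.Dict String (PySem.Set String)) c => d.insert c PySem.Set.empty)
        (PySem.Dict.empty : PySem.Dict String (PySem.Set String))).keys
      = PySem.Set.ofList courses := by
    rw [PySem.Dict.keys_foldl_insert
      (f := fun (_ : PySem.Dict String (PySem.Set String)) (_ : String) => (PySem.Set.empty : PySem.Set String))]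
    simp [PySem.Dict.keys_empty, PySem.Set.update_nil_left]
  refine pv_foldl_inv_mem _ (fun d : PySem.Dict String (PySem.Set String) => d.keys = PySem.Set.ofList courses) courses ?_ _ h0
  intro d c1 hc1 hd
  rw [pv_innerA_eq]
  refine pv_foldl_inv_mem _ (fun d : PySem.Dict String (PySem.Set String) => d.keys = PySem.Set.ofList courses) _ ?_ d hd
  intro d x _ hd'
  rw [PySem.Dict.keys_modify, PySem.Dict.keys_insert_of_contains _ _
    ((PySem.Dict.contains_iff_mem_keys _ _).2 (by rw [hd']; exact (PySem.Set.mem_ofList _ _).2 hc1))]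
  exact hd'

-- ===== B-side characterisation =====

lemma pv_memBS_inner (lst : List String) (c0 : String)
    (d : PySem.Dict String (PySem.Set String)) (s y : String) :
    y ∈ ((lst.foldl (fun d s' => d.modify s' PySem.Set.empty (fun g => PySem.Set.add g c0)) d).getD s PySem.Set.empty)
    ↔ (y ∈ d.getD s PySem.Set.empty ∨ (y = c0 ∧ s ∈ lst)) := by
  induction lst generalizing d with
  | nil => simp
  | cons a t ih =>
    rw [List.foldl_cons, ih, PySem.Dict.getD_modify]
    by_cases h : s = a
    · subst h
      simp [PySem.Set.mem_add]
      tauto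
    · simp only [if_neg h, List.mem_cons]
      tauto

lemma pv_memBS (uniq : List String) (students : List (String × List String)) (s y : String) :
    y ∈ ((pvByStudent uniq students).getD s PySem.Set.empty)
    ↔ (y ∈ uniq ∧ s ∈ pvLookup students y) := by
  unfold pvByStudent
  have H : ∀ (l : List String) (d : PySem.Dict String (PySem.Set String)),
      y ∈ ((l.foldl (fun d c => (pvLookup students c).foldl
          (fun d s' => d.modify s' PySem.Set.empty (fun g => PySem.Set.add g c)) d) d).getD s PySem.Set.empty)
      ↔ (y ∈ d.getD s PySem.Set.empty ∨ (y ∈ l ∧ s ∈ pvLookup students y)) := by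
    intro l
    induction l with
    | nil => simp
    | cons c t ih =>
      intro d
      rw [List.foldl_cons, ih, pv_memBS_inner]
      constructor
      · rintro ((h | ⟨rfl, h⟩) | ⟨h1, h2⟩)
        · exact Or.inl h
        · exact Or.inr ⟨by simp, h⟩
        · exact Or.inr ⟨by simp [h1], h2⟩
      · rintro (h | ⟨h1, h2⟩)
        · exact Or.inl (Or.inl h)
        · rcases List.mem_cons.1 h1 with rfl | h1
          · exact Or.inl (Or.inr ⟨rfl, h2⟩)
          · exact Or.inr ⟨h1, h2⟩
  rw [H]
  simp [PySem.Dict.getD_empty, PySem.Set.empty]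

lemma pv_bs_keys_nodup (uniq : List String) (students : List (String × List String)) :
    (pvByStudent uniq students).keys.Nodup := by
  unfold pvByStudent
  refine pv_foldl_inv_mem _ (fun d : PySem.Dict String (PySem.Set String) => d.keys.Nodup) uniq ?_ _ PySem.Dict.nodup_keys_empty
  intro d b _ hd
  exact PySem.Dict.nodup_keys_foldl_modify_key (pvLookup students b) (fun s => s)
    PySem.Set.empty (fun _ _ => fun g => PySem.Set.add g b) d hd

lemma pv_memG_inner (l g : List String) (d : PySem.Dict String (PySem.Set String)) (c y : String) :
    y ∈ ((l.foldl (fun d c' => d.modify c' PySem.Set.empty (fun s => PySem.Set.update s g)) d).getD c PySem.Set.empty)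
    ↔ (y ∈ d.getD c PySem.Set.empty ∨ (c ∈ l ∧ y ∈ g)) := by
  induction l generalizing d with
  | nil => simp
  | cons a t ih =>
    rw [List.foldl_cons, ih, PySem.Dict.getD_modify]
    by_cases h : c = a
    · subst h
      simp [PySem.Set.mem_update]
      tauto
    · simp only [if_neg h, List.mem_cons]
      tauto

lemma pv_memG_fold (vals : List (PySem.Set String)) (d : PySem.Dict String (PySem.Set String)) (c y : String) :
    y ∈ ((vals.foldl (fun d g => g.foldl
        (fun d c' => d.modify c' PySem.Set.empty (fun s => PySem.Set.update s g)) d) d).getD c PySem.Set.empty)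
    ↔ (y ∈ d.getD c PySem.Set.empty ∨ ∃ g ∈ vals, c ∈ g ∧ y ∈ g) := by
  induction vals generalizing d with
  | nil => simp
  | cons g t ih =>
    rw [List.foldl_cons, ih, pv_memG_inner]
    constructor
    · rintro ((h | ⟨h1, h2⟩) | ⟨g', hg', h1, h2⟩)
      · exact Or.inl h
      · exact Or.inr ⟨g, by simp, h1, h2⟩
      · exact Or.inr ⟨g', by simp [hg'], h1, h2⟩
    · rintro (h | ⟨g', hg', h1, h2⟩)
      · exact Or.inl (Or.inl h)
      · rcases List.mem_cons.1 hg' with rfl | hg'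
        · exact Or.inl (Or.inr ⟨h1, h2⟩)
        · exact Or.inr ⟨g', hg', h1, h2⟩

lemma pv_mem_values_iff (bs : PySem.Dict String (PySem.Set String)) (hk : bs.keys.Nodup) (c y : String) :
    (∃ g ∈ bs.values, c ∈ g ∧ y ∈ g)
    ↔ ∃ s, c ∈ bs.getD s PySem.Set.empty ∧ y ∈ bs.getD s PySem.Set.empty := by
  constructor
  · rintro ⟨g, hg, hc, hy⟩
    simp only [PySem.Dict.values] at hg
    obtain ⟨⟨s, g'⟩, hmem, rfl⟩ := List.mem_map.1 hg
    have hgd : bs.getD s PySem.Set.empty = g' := PySem.Dict.getD_of_mem_items bs hmem hk _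
    exact ⟨s, hgd ▸ hc, hgd ▸ hy⟩
  · rintro ⟨s, hc, hy⟩
    have hcont : bs.contains s = true := by
      by_contra h
      have h2 : (bs.get? s).isSome = false := by
        rw [← PySem.Dict.contains_eq_isSome_get?]
        simpa using h
      have hnone : bs.get? s = none := Option.not_isSome_iff_eq_none.mp (by simp [h2])
      rw [PySem.Dict.getD_eq_get?_getD, hnone] at hc
      simp [PySem.Set.empty] at hc
    obtain ⟨g, hg⟩ : ∃ g, bs.get? s = some g := by
      rw [PySem.Dict.contains_eq_isSome_get?] at hcont
      exact Option.isSome_iff_exists.mp hcont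
    have hitems := PySem.Dict.mem_items_of_get?_eq_some bs hg
    have hgd : bs.getD s PySem.Set.empty = g := PySem.Dict.getD_of_mem_items bs hitems hk _
    refine ⟨g, ?_, hgd ▸ hc, hgd ▸ hy⟩
    simp only [PySem.Dict.values]
    exact List.mem_map.2 ⟨(s, g), hitems, rfl⟩

lemma pv_groups_getD_nodup (bs : PySem.Dict String (PySem.Set String)) (c : String) :
    ((pvGroups bs).getD c PySem.Set.empty).Nodup := by
  unfold pvGroups
  refine pv_foldl_inv_mem _ (fun d : PySem.Dict String (PySem.Set String) => ∀ c, (d.getD c PySem.Set.empty).Nodup) bs.values ?_ _ ?_ c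
  · intro d g _ hd
    refine pv_foldl_inv_mem _ (fun d : PySem.Dict String (PySem.Set String) => ∀ c, (d.getD c PySem.Set.empty).Nodup) _ ?_ d hd
    intro d c' _ hd c
    rw [PySem.Dict.getD_modify]
    split
    · apply PySem.Set.nodup_update
      exact hd _
    · exact hd c
  · intro c
    simp [PySem.Dict.getD_empty, PySem.Set.empty]

lemma pv_getD_foldl_insert (l : List String) (v : String → PySem.Set String)
    (d : PySem.Dict String (PySem.Set String)) (c : String) :
    ((l.foldl (fun d c => d.insert c (v c)) d).getD c PySem.Set.empty)
    = if c ∈ l then v c else d.getD c PySem.Set.empty := by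
  induction l generalizing d with
  | nil => simp
  | cons a t ih =>
    rw [List.foldl_cons, ih]
    by_cases ht : c ∈ t
    · simp [ht, List.mem_cons]
    · rw [PySem.Dict.getD_insert]
      by_cases ha : c = a <;> simp [ht, ha, List.mem_cons]

lemma pv_memAdj (courses : List String) (students : List (String × List String)) (c y : String) :
    y ∈ ((pvAdj courses students).getD c PySem.Set.empty)
    ↔ (c ∈ courses ∧ y ∈ courses ∧ c ≠ y ∧ pvShares students c y) := by
  have hmu : ∀ x : String, x ∈ PySem.List.dedup courses ↔ x ∈ courses := fun x =>
    PySem.Set.mem_ofList courses x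
  unfold pvAdj
  rw [pv_getD_foldl_insert]
  by_cases hu : c ∈ PySem.List.dedup courses
  · rw [if_pos hu]
    rw [PySem.Set.mem_diff]
    unfold pvGroups
    rw [pv_memG_fold, pv_mem_values_iff _ (pv_bs_keys_nodup _ _)]
    simp only [PySem.Dict.getD_empty, pv_not_mem_empty, false_or]
    constructor
    · rintro ⟨⟨s, hcs, hys⟩, hne⟩
      rw [pv_memBS] at hcs hys
      refine ⟨(hmu c).1 hcs.1, (hmu y).1 hys.1, ?_, ⟨s, hcs.2, hys.2⟩⟩
      intro h
      exact hne (by simp [h])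
    · rintro ⟨hc, hy, hne, s, h1, h2⟩
      refine ⟨⟨s, ?_, ?_⟩, ?_⟩
      · rw [pv_memBS]; exact ⟨(hmu c).2 hc, h1⟩
      · rw [pv_memBS]; exact ⟨(hmu y).2 hy, h2⟩
      · simp only [List.mem_singleton]
        exact fun h => hne h.symm
  · rw [if_neg hu]
    have hc : ¬ c ∈ courses := fun h => hu ((hmu c).2 h)
    simp [PySem.Dict.getD_empty, PySem.Set.empty, hc]

lemma pv_adj_getD_nodup (courses : List String) (students : List (String × List String)) (c : String) :
    ((pvAdj courses students).getD c PySem.Set.empty).Nodup := by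
  unfold pvAdj
  rw [pv_getD_foldl_insert]
  split
  · apply PySem.Set.nodup_diff
    exact pv_groups_getD_nodup _ _
  · simp [PySem.Dict.getD_empty, PySem.Set.empty]

lemma pv_conf_mem_iff (courses : List String) (students : List (String × List String)) (c y : String) :
    (y ∈ (pvConflicts courses students).getD c PySem.Set.empty)
    ↔ (y ∈ (pvAdj courses students).getD c PySem.Set.empty) :=
  (pv_memA courses students c y).trans (pv_memAdj courses students c y).symm

lemma pv_conf_adj_perm (courses : List String) (students : List (String × List String)) (c : String) :
    ((pvConflicts courses students).getD c PySem.Set.empty).Perm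
      ((pvAdj courses students).getD c PySem.Set.empty) :=
  (List.perm_ext_iff_of_nodup (pv_confA_getD_nodup _ _ _) (pv_adj_getD_nodup _ _ _)).2
    (fun y => pv_conf_mem_iff courses students c y)

-- ===== sorting =====

lemma pv_insertBy_congr {α : Type} (f g : α → α → Bool) (x : α) :
    ∀ (ys : List α), (∀ b ∈ ys, f x b = g x b) →
      PySem.List.insertBy f x ys = PySem.List.insertBy g x ys
  | [], _ => rfl
  | y :: t, h => by
    have hy : f x y = g x y := h y (by simp)
    show (if f x y then x :: y :: t else y :: PySem.List.insertBy f x t)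
      = (if g x y then x :: y :: t else y :: PySem.List.insertBy g x t)
    rw [hy]
    split
    · rfl
    · rw [pv_insertBy_congr f g x t (fun b hb => h b (by simp [hb]))]

lemma pv_sorted_rev_congr (xs : List String) (k1 k2 : String → Int)
    (h : ∀ x ∈ xs, k1 x = k2 x) :
    PySem.List.sorted xs k1 true = PySem.List.sorted xs k2 true := by
  rw [PySem.List.sorted_rev_eq_foldl_insertBy, PySem.List.sorted_rev_eq_foldl_insertBy]
  suffices H : ∀ (l : List String) (acc : List String), (∀ a ∈ l, k1 a = k2 a) →
      (∀ a ∈ acc, k1 a = k2 a) →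
      l.foldl (fun acc x => PySem.List.insertBy (fun a b => decide (k1 b < k1 a)) x acc) acc
      = l.foldl (fun acc x => PySem.List.insertBy (fun a b => decide (k2 b < k2 a)) x acc) acc by
    exact H xs [] h (by simp)
  intro l
  induction l with
  | nil => intro acc _ _; rfl
  | cons x t ih =>
    intro acc hl hacc
    rw [List.foldl_cons, List.foldl_cons]
    have e1 : PySem.List.insertBy (fun a b => decide (k1 b < k1 a)) x acc
        = PySem.List.insertBy (fun a b => decide (k2 b < k2 a)) x acc :=
      pv_insertBy_congr _ _ _ acc (fun b hb => by rw [hl x (by simp), hacc b hb])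
    rw [e1]
    refine ih _ (fun a ha => hl a (by simp [ha])) ?_
    intro b hb
    rcases (PySem.List.mem_insertBy _ _ _ _).1 hb with h1 | h1
    · rw [h1]; exact hl x (by simp)
    · exact hacc b h1

-- ===== the used-slots set and the minimal free slot =====

lemma pv_used_eq (conf : PySem.Dict String (PySem.Set String)) (ts : PySem.Dict String Int) (c : String) :
    pvUsed conf ts c = PySem.Set.ofList
      (((conf.getD c PySem.Set.empty).filter (fun n => ts.contains n)).map (fun n => ts.getD n 0)) := by
  unfold pvUsed
  rw [PySem.List.foldl_if_eq_foldl_filter (p := fun n => ts.contains n)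
    (f := fun u n => PySem.Set.add u (ts.getD n 0))]
  rw [← PySem.Set.update_map_eq_foldl_add]
  rw [show (PySem.Set.empty : PySem.Set Int) = [] from rfl, PySem.Set.update_nil_left]

lemma pv_used_mem (conf : PySem.Dict String (PySem.Set String)) (ts : PySem.Dict String Int)
    (c : String) (y : Int) :
    y ∈ pvUsed conf ts c
    ↔ ∃ n, n ∈ conf.getD c PySem.Set.empty ∧ ts.contains n = true ∧ y = ts.getD n 0 := by
  rw [pv_used_eq]
  rw [PySem.Set.mem_ofList]
  constructor
  · intro h
    obtain ⟨n, hn, rfl⟩ := List.mem_map.1 h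
    exact ⟨n, (List.mem_filter.1 hn).1, (List.mem_filter.1 hn).2, rfl⟩
  · rintro ⟨n, h1, h2, rfl⟩
    exact List.mem_map.2 ⟨n, List.mem_filter.2 ⟨h1, h2⟩, rfl⟩

lemma pv_used_nodup (conf : PySem.Dict String (PySem.Set String)) (ts : PySem.Dict String Int) (c : String) :
    (pvUsed conf ts c).Nodup := by
  rw [pv_used_eq]; exact PySem.Set.nodup_ofList _

lemma pv_used_len_le (conf : PySem.Dict String (PySem.Set String)) (ts : PySem.Dict String Int) (c : String) :
    (pvUsed conf ts c).length ≤ (conf.getD c PySem.Set.empty).length := by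
  rw [pv_used_eq]
  refine le_trans (PySem.Set.length_ofList_le _) ?_
  rw [List.length_map]
  exact List.length_filter_le _ _

lemma pv_used_perm (courses : List String) (students : List (String × List String))
    (ts : PySem.Dict String Int) (c : String) :
    (pvUsed (pvConflicts courses students) ts c).Perm (pvUsed (pvAdj courses students) ts c) := by
  refine (List.perm_ext_iff_of_nodup (pv_used_nodup _ _ _) (pv_used_nodup _ _ _)).2 ?_
  intro y
  rw [pv_used_mem, pv_used_mem]
  constructor <;> rintro ⟨n, h1, h2, h3⟩ <;> refine ⟨n, ?_, h2, h3⟩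
  · exact (pv_conf_mem_iff courses students c n).1 h1
  · exact (pv_conf_mem_iff courses students c n).2 h1

lemma pv_exists_free (u : List Int) : ∃ k : Nat, k ≤ u.length ∧ ((k : Int) ∉ u) := by
  by_contra h
  push Not at h
  have hsub : ((List.range (u.length + 1)).map (fun k : Nat => (k : Int))) ⊆ u := by
    intro y hy
    obtain ⟨k, hk, rfl⟩ := List.mem_map.1 hy
    exact h k (Nat.lt_succ_iff.mp (List.mem_range.1 hk))
  have hnd : ((List.range (u.length + 1)).map (fun k : Nat => (k : Int))).Nodup :=
    (List.nodup_range).map (fun a b hab => by exact_mod_cast hab)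
  have hle := (List.subperm_of_subset hnd hsub).length_le
  simp only [List.length_map, List.length_range] at hle
  omega

lemma pv_find?_pyRange (p : Int → Bool) (n m : Nat) (hmn : m < n) (hp : p (m : Int) = true)
    (hmin : ∀ k, k < m → p (k : Int) = false) :
    (PySem.List.pyRange 0 (n : Int)).find? p = some (m : Int) := by
  rw [PySem.List.pyRange_zero_natCast, List.find?_map]
  have h : List.find? (p ∘ fun k : Nat => (k : Int)) (List.range n) = some m := by
    induction n with
    | zero => omega
    | succ n ih =>
      rw [List.range_succ, List.find?_append]
      rcases Nat.lt_or_ge m n with hlt | hge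
      · rw [ih hlt]; rfl
      · have hmn' : m = n := by omega
        subst hmn'
        rw [List.find?_eq_none.2 (fun x hx => by
          simp only [Function.comp_apply, hmin x (List.mem_range.1 hx)]; simp)]
        simp [List.find?, Function.comp, hp]
  rw [h]; rfl

lemma pv_free_iff (u : PySem.Set Int) (z : Int) :
    ((!(PySem.Set.contains u z)) = true) ↔ z ∉ u := by
  simp [PySem.Set.contains]

lemma pv_confA_len_lt (courses : List String) (students : List (String × List String))
    (c : String) (hc : c ∈ courses) :
    ((pvConflicts courses students).getD c PySem.Set.empty).length < courses.length := by
  have hnd : ((pvConflicts courses students).getD c PySem.Set.empty).Nodup :=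
    pv_confA_getD_nodup courses students c
  have hcX : c ∉ (pvConflicts courses students).getD c PySem.Set.empty := fun h =>
    ((pv_memA courses students c c).1 h).2.2.1 rfl
  have hsub : (c :: (pvConflicts courses students).getD c PySem.Set.empty) ⊆ courses := by
    intro y hy
    rcases List.mem_cons.1 hy with rfl | hy
    · exact hc
    · exact ((pv_memA courses students c y).1 hy).2.1
  have hle := (List.subperm_of_subset (List.nodup_cons.2 ⟨hcX, hnd⟩) hsub).length_le
  simp only [List.length_cons] at hle
  omega

-- ===== VERDICT (by name: the statement is the Claim_ definition above) =====
theorem schedule_exams_spec : Claim_equal_schedule_exams := by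
  unfold Claim_equal_schedule_exams
  intro courses students _ _
  unfold Spec_schedule_exams
  simp only [schedule_exams, schedule_exams_alt]
  have hperm : ∀ x, ((pvConflicts courses students).getD x PySem.Set.empty).Perm
      ((pvAdj courses students).getD x PySem.Set.empty) := pv_conf_adj_perm courses students
  have horder : PySem.List.sorted (pvConflicts courses students).keys
        (fun x => PySem.Set.len ((pvConflicts courses students).getD x PySem.Set.empty)) true
      = PySem.List.sorted (PySem.List.dedup courses)
        (fun c => PySem.Set.len ((pvAdj courses students).getD c PySem.Set.empty)) true := by
    rw [pv_keysA, show PySem.Set.ofList courses = PySem.List.dedup courses from rfl]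
    exact pv_sorted_rev_congr _ _ _ (fun x _ => by
      simp only [PySem.Set.len, Nat.cast_inj]
      exact (hperm x).length_eq)
  rw [horder]
  congr 1
  refine PySem.List.foldl_congr_mem _ _ _ _ ?_
  intro ts c hcmem
  have hc : c ∈ courses := by
    have h1 := (PySem.List.sorted_perm (xs := PySem.List.dedup courses)
      (key := fun c => PySem.Set.len ((pvAdj courses students).getD c PySem.Set.empty))
      (rev := true)).mem_iff.1 hcmem
    exact (PySem.Set.mem_ofList courses c).1 h1
  have hup : (pvUsed (pvConflicts courses students) ts c).Perm
      (pvUsed (pvAdj courses students) ts c) := pv_used_perm courses students ts c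
  have hlen : (pvUsed (pvConflicts courses students) ts c).length
      = (pvUsed (pvAdj courses students) ts c).length := hup.length_eq
  obtain ⟨k, hk_le, hk_free⟩ := pv_exists_free (pvUsed (pvConflicts courses students) ts c)
  have hEx : ∃ j : Nat, ((j : Int) ∉ pvUsed (pvConflicts courses students) ts c) := ⟨k, hk_free⟩
  have hm_free : ((Nat.find hEx : Nat) : Int) ∉ pvUsed (pvConflicts courses students) ts c :=
    Nat.find_spec hEx
  have hm_min : ∀ j, j < Nat.find hEx → ((j : Int) ∈ pvUsed (pvConflicts courses students) ts c) :=
    fun j hj => not_not.mp (Nat.find_min hEx hj)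
  have hm_le : Nat.find hEx ≤ (pvUsed (pvConflicts courses students) ts c).length :=
    le_trans (Nat.find_min' hEx hk_free) hk_le
  have hmA : Nat.find hEx < courses.length :=
    lt_of_le_of_lt (le_trans hm_le (pv_used_len_le _ _ _)) (pv_confA_len_lt courses students c hc)
  have hfA : (PySem.List.pyRange 0 (courses.length : Int)).find?
      (fun slot => !(PySem.Set.contains (pvUsed (pvConflicts courses students) ts c) slot))
      = some ((Nat.find hEx : Nat) : Int) :=
    pv_find?_pyRange _ _ _ hmA ((pv_free_iff _ _).2 hm_free)
      (fun j hj => by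
        have := hm_min j hj
        simp [PySem.Set.contains, this])
  have hmB : Nat.find hEx < (pvUsed (pvAdj courses students) ts c).length + 1 := by omega
  have hfB : (PySem.List.pyRange 0
        (PySem.Set.len (pvUsed (pvAdj courses students) ts c) + 1)).find?
      (fun t => !(PySem.Set.contains (pvUsed (pvAdj courses students) ts c) t))
      = some ((Nat.find hEx : Nat) : Int) := by
    have hcast : PySem.Set.len (pvUsed (pvAdj courses students) ts c) + 1
        = (((pvUsed (pvAdj courses students) ts c).length + 1 : Nat) : Int) := by
      simp [PySem.Set.len]
    rw [hcast]
    refine pv_find?_pyRange _ _ _ hmB ((pv_free_iff _ _).2 ?_) (fun j hj => ?_)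
    · exact fun h => hm_free (hup.mem_iff.2 h)
    · have := hup.mem_iff.1 (hm_min j hj)
      simp [PySem.Set.contains, this]
  rw [hfA, hfB]
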